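-- pv_equiv track=rewrite | github.com/adanzl/leetcode-practice | py/q2000/Q2088.py | countPyramids1
-- ===== SOURCE A (Python) =====
-- from itertools import accumulate
-- from typing import List
--
-- def countPyramids1(grid: List[List[int]]) -> int:
--     m, n = len(grid), len(grid[0])
--     p_sum = [[0] + list(accumulate(grid[i])) for i in range(m)]
--     ans = 0
--     for i in range(m):
--         for j in range(n):
--             if grid[i][j] == 0: continue
--             for d in range(1, m - i):
--                 l, r = j - d, j + d
--                 if l < 0 or r > n - 1: break
--                 ss = p_sum[i + d][r + 1] - p_sum[i + d][l]
--                 if ss != d * 2 + 1: break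
--                 ans += 1
--             for d in range(1, i + 1):
--                 l, r = j - d, j + d
--                 if l < 0 or r > n - 1: break
--                 ss = p_sum[i - d][r + 1] - p_sum[i - d][l]
--                 if ss != d * 2 + 1: break
--                 ans += 1
--     return ans
-- ===== SOURCE B (Python) =====
-- from itertools import accumulate
-- from typing import List
--
-- def countPyramids1(grid: List[List[int]]) -> int:
--     m, n = len(grid), len(grid[0])
--     ps = [[0] + list(accumulate(row)) for row in grid]
--
--     def solve(sgn):
--         alive = [(i, j) for i in range(m) for j in range(n) if grid[i][j]]
--         total, d = 0, 1
--         while alive: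
--             alive = [(i, j) for (i, j) in alive
--                      if 0 <= i + sgn * d < m and d <= j and j + d < n
--                      and ps[i + sgn * d][j + d + 1] - ps[i + sgn * d][j - d] == 2 * d + 1]
--             total += len(alive)
--             d += 1
--         return total
--
--     return solve(1) + solve(-1)
-- ===== Notes on version B (the rewrite author's own statement) =====
-- stated objective: alternative
-- what changed: Replaces A's per-apex expansion (restarting a prefix-sum window scan from every apex, in each direction) by a depth-synchronous frontier: a list of surviving apexes is filtered once per depth level and the survivors are counted, run once with sgn=+1 and once with sgn=-1.
import Mathlib
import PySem

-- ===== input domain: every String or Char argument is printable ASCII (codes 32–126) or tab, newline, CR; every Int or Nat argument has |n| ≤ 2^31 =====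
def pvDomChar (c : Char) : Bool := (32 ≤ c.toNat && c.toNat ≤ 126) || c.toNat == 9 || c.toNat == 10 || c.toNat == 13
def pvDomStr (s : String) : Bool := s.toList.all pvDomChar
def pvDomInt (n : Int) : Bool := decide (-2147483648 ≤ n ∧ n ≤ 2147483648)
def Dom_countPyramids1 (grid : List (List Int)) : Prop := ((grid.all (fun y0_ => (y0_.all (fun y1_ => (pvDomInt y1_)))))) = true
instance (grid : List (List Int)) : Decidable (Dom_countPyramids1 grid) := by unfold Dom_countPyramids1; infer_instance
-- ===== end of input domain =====

-- B replaces A's per-apex window scans (restarted from every apex) by a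
-- depth-synchronous frontier: one surviving-apex list per depth, filtered once
-- per level and counted; objective: alternative (different traversal, same cost).

-- ===== PORT A =====
-- p_sum[i] = [0] + list(accumulate(grid[i]))  (itertools.accumulate ported as scanl)
def aPrefix (row : List Int) : List Int := List.scanl (· + ·) 0 row

-- the two inner 'for d in range(1, …): … break' loops of A: count successes until break
def aScan (pSum : List (List Int)) (n : Int) (j : Nat) (rowOf : Nat → Nat) :
    Nat → Nat → Int
  | 0, _ => 0
  | fuel + 1, d =>
    let l : Int := (j : Int) - (d : Int)
    let r : Int := (j : Int) + (d : Int)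
    if l < 0 ∨ r > n - 1 then 0
    else
      let ps := pSum.getD (rowOf d) []
      let ss := ps.getD (r + 1).toNat 0 - ps.getD l.toNat 0
      if ss ≠ 2 * (d : Int) + 1 then 0
      else 1 + aScan pSum n j rowOf fuel (d + 1)

def countPyramids1 (grid : List (List Int)) : Int :=
  let m := grid.length
  let n := (grid.getD 0 []).length
  let pSum := grid.map aPrefix
  (List.range m).foldl (fun ans i =>
    (List.range n).foldl (fun ans j =>
      if (grid.getD i []).getD j 0 = 0 then ans
      else ans + aScan pSum (n : Int) j (fun d => i + d) (m - i - 1) 1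
               + aScan pSum (n : Int) j (fun d => i - d) i 1) ans) 0

-- ===== PORT B =====
def altPrefix (row : List Int) : List Int := List.scanl (· + ·) 0 row

-- the comprehension filter of one depth step (k = i + sgn*d; conditions in Python order)
def altCond (ps : List (List Int)) (m n : Nat) (sgn : Int) (d : Nat) (p : Nat × Nat) : Bool :=
  decide (0 ≤ (p.1 : Int) + sgn * (d : Int)) &&
  decide ((p.1 : Int) + sgn * (d : Int) < (m : Int)) &&
  decide (d ≤ p.2) && decide (p.2 + d < n) &&
  decide ((ps.getD ((p.1 : Int) + sgn * (d : Int)).toNat []).getD (p.2 + d + 1) 0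
      - (ps.getD ((p.1 : Int) + sgn * (d : Int)).toNat []).getD (p.2 - d) 0
      = 2 * (d : Int) + 1)

-- 'while alive: …' — the frontier empties after at most m+1 levels, which is the fuel
def altLoop (ps : List (List Int)) (m n : Nat) (sgn : Int) :
    Nat → Nat → List (Nat × Nat) → Int
  | 0, _, _ => 0
  | fuel + 1, d, alive =>
    if alive.isEmpty then 0
    else
      let nxt := alive.filter (altCond ps m n sgn d)
      (nxt.length : Int) + altLoop ps m n sgn fuel (d + 1) nxt

def altSolve (g : List (List Int)) (sgn : Int) : Int :=
  let m := g.length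
  let n := (g.getD 0 []).length
  let ps := g.map altPrefix
  let alive := (List.range m).flatMap (fun i =>
    ((List.range n).filter (fun j => (g.getD i []).getD j 0 ≠ 0)).map (fun j => (i, j)))
  altLoop ps m n sgn (m + 1) 1 alive

def countPyramids1_alt (grid : List (List Int)) : Int :=
  altSolve grid 1 + altSolve grid (-1)

-- ===== PRECONDITION & SPEC =====
-- Pre_ is exactly the set of inputs on which A returns normally: A raises IndexError
-- on the empty grid (grid[0]) and whenever some row is shorter than the first row
-- (every grid[i][j], j < len(grid[0]), is indexed).
def Pre_countPyramids1 (grid : List (List Int)) : Prop :=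
  grid ≠ [] ∧ ∀ row ∈ grid, (grid.headD []).length ≤ row.length

instance (grid : List (List Int)) : Decidable (Pre_countPyramids1 grid) := by
  unfold Pre_countPyramids1; infer_instance

def pvWitness_countPyramids1 : List (List Int) := [[0, 1, 0], [1, 1, 1]]

def Spec_countPyramids1 (grid : List (List Int)) (out : Int) : Prop := out = countPyramids1_alt grid
instance (grid : List (List Int)) (out : Int) : Decidable (Spec_countPyramids1 grid out) := by unfold Spec_countPyramids1; infer_instance

-- ===== CLAIM (what is proved, stated in full; the proofs are below) =====
def Claim_equal_countPyramids1 : Prop := ∀ (grid : List (List Int)), Dom_countPyramids1 grid → Pre_countPyramids1 grid → Spec_countPyramids1 grid (countPyramids1 grid)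

-- ===== LEMMAS AND PROOFS =====

-- the pure meaning of step e of A's scans: bounds + the prefix-sum window test
def pvCB (g : List (List Int)) (n j : Nat) (rowOf : Nat → Nat) (e : Nat) : Bool :=
  decide (e ≤ j ∧ j + e + 1 ≤ n ∧
    ((g.map aPrefix).getD (rowOf e) []).getD (j + e + 1) 0
      - ((g.map aPrefix).getD (rowOf e) []).getD (j - e) 0 = 2 * (e : Int) + 1)

-- length of the longest run of successes of P starting at d, capped at fuel
def runLen (P : Nat → Bool) : Nat → Nat → Nat
  | 0, _ => 0
  | f + 1, d => if P d then runLen P f (d + 1) + 1 else 0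

theorem runLen_le (P : Nat → Bool) : ∀ (fuel d : Nat), runLen P fuel d ≤ fuel := by
  intro fuel
  induction fuel with
  | zero => intro d; simp [runLen]
  | succ f ih =>
    intro d
    simp only [runLen]
    split
    · have := ih (d + 1); omega
    · omega

theorem runLen_true (P : Nat → Bool) : ∀ (fuel d e : Nat), d ≤ e →
    e < d + runLen P fuel d → P e = true := by
  intro fuel
  induction fuel with
  | zero => intro d e _ h2; simp [runLen] at h2; omega
  | succ f ih =>
    intro d e h1 h2
    simp only [runLen] at h2
    by_cases hp : P d
    · rcases Nat.eq_or_lt_of_le h1 with rfl | hlt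
      · exact hp
      · rw [if_pos hp] at h2
        exact ih (d + 1) e hlt (by omega)
    · rw [if_neg hp] at h2; omega

theorem runLen_stop (P : Nat → Bool) : ∀ (fuel d : Nat), runLen P fuel d < fuel →
    P (d + runLen P fuel d) = false := by
  intro fuel
  induction fuel with
  | zero => intro d h; omega
  | succ f ih =>
    intro d h
    simp only [runLen] at h ⊢
    by_cases hp : P d
    · rw [if_pos hp] at h ⊢
      have := ih (d + 1) (by omega)
      have he : d + (runLen P f (d + 1) + 1) = d + 1 + runLen P f (d + 1) := by omega
      rw [he]
      exact this
    · rw [if_neg hp]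
      simpa using hp

theorem runLen_eq_of (P : Nat → Bool) : ∀ (fuel d t : Nat), t ≤ fuel →
    (∀ e, d ≤ e → e < d + t → P e = true) →
    (t = fuel ∨ P (d + t) = false) → runLen P fuel d = t := by
  intro fuel
  induction fuel with
  | zero => intro d t h1 _ _; simp [runLen]; omega
  | succ f ih =>
    intro d t h1 h2 h3
    simp only [runLen]
    cases t with
    | zero =>
      rcases h3 with h3 | h3
      · omega
      · simp at h3; rw [if_neg (by simp [h3])]
    | succ t' =>
      rw [if_pos (h2 d (le_refl d) (by omega))]
      have h3' : t' = f ∨ P (d + 1 + t') = false := by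
        rcases h3 with h3 | h3
        · left; omega
        · right
          have he : d + 1 + t' = d + (t' + 1) := by omega
          rw [he]; exact h3
      have := ih (d + 1) t' (by omega) (fun e he1 he2 => h2 e (by omega) (by omega)) h3'
      omega

-- the scans of A compute runLen of the pure predicate
theorem aScan_eq (g : List (List Int)) (n : Nat) :
    ∀ (fuel d j : Nat) (rowOf : Nat → Nat),
    aScan (g.map aPrefix) (n : Int) j rowOf fuel d
      = (runLen (pvCB g n j rowOf) fuel d : Int) := by
  intro fuel
  induction fuel with
  | zero => intro d j rowOf; simp [aScan, runLen]
  | succ f ih =>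
    intro d j rowOf
    simp only [aScan, runLen]
    by_cases hbound : d ≤ j ∧ j + d + 1 ≤ n
    · rw [if_neg (by push_cast; omega)]
      have hnat1 : ((j : Int) + (d : Int) + 1).toNat = j + d + 1 := by omega
      have hnat2 : ((j : Int) - (d : Int)).toNat = j - d := by omega
      rw [hnat1, hnat2]
      by_cases hss : ((g.map aPrefix).getD (rowOf d) []).getD (j + d + 1) 0
          - ((g.map aPrefix).getD (rowOf d) []).getD (j - d) 0 = 2 * (d : Int) + 1
      · rw [if_neg (by simpa using hss)]
        have hP : pvCB g n j rowOf d = true := by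
          simp only [pvCB, decide_eq_true_eq]
          exact ⟨hbound.1, hbound.2, hss⟩
        rw [hP, if_pos rfl, ih (d + 1) j rowOf]
        push_cast
        ring
      · rw [if_pos (by simpa using hss)]
        have hP : pvCB g n j rowOf d = false := by
          simp only [pvCB, decide_eq_false_iff_not]
          rintro ⟨-, -, h⟩
          exact hss h
        rw [hP]
        simp
    · rw [if_pos (by push_cast; omega)]
      have hP : pvCB g n j rowOf d = false := by
        simp only [pvCB, decide_eq_false_iff_not]
        rintro ⟨h1, h2, -⟩
        exact hbound ⟨h1, h2⟩
      rw [hP]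
      simp

-- B's step condition in terms of A's predicate, downward direction
theorem altCond_down (g : List (List Int)) (n i j e : Nat) :
    altCond (g.map altPrefix) g.length n 1 e (i, j)
      = (decide (i + e < g.length) && pvCB g n j (fun t => i + t) e) := by
  have hk : ((i : Int) + 1 * (e : Int)).toNat = i + e := by omega
  rw [Bool.eq_iff_iff]
  simp only [altCond, pvCB, show altPrefix = aPrefix from rfl, hk,
    Bool.and_eq_true, decide_eq_true_eq]
  constructor
  · rintro ⟨⟨⟨⟨h1, h2⟩, h3⟩, h4⟩, h5⟩
    exact ⟨by omega, by omega, by omega, h5⟩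
  · rintro ⟨h1, h2, h3, h4⟩
    exact ⟨⟨⟨⟨by omega, by omega⟩, by omega⟩, by omega⟩, h4⟩

-- B's step condition in terms of A's predicate, upward direction
theorem altCond_up (g : List (List Int)) (n : Nat) {i : Nat} (j e : Nat)
    (hi : i < g.length) :
    altCond (g.map altPrefix) g.length n (-1) e (i, j)
      = (decide (e ≤ i) && pvCB g n j (fun t => i - t) e) := by
  have hk : ((i : Int) + (-1) * (e : Int)).toNat = i - e := by omega
  rw [Bool.eq_iff_iff]
  simp only [altCond, pvCB, show altPrefix = aPrefix from rfl, hk,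
    Bool.and_eq_true, decide_eq_true_eq]
  constructor
  · rintro ⟨⟨⟨⟨h1, h2⟩, h3⟩, h4⟩, h5⟩
    exact ⟨by omega, by omega, by omega, h5⟩
  · rintro ⟨h1, h2, h3, h4⟩
    exact ⟨⟨⟨⟨by omega, by omega⟩, by omega⟩, by omega⟩, h4⟩

-- survivors-per-level counting: one level contributes length + the rest
theorem filter_len_sum {α : Type} (q : α → Bool) (F : α → Int) : ∀ (L : List α),
    ((L.filter q).length : Int) + ((L.filter q).map F).sum
      = (L.map (fun p => if q p then 1 + F p else 0)).sum := by
  intro L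
  induction L with
  | nil => simp
  | cons x xs ih =>
    simp only [List.filter_cons, List.map_cons, List.sum_cons]
    by_cases hx : q x
    · rw [if_pos hx, if_pos hx]
      simp only [List.length_cons, List.map_cons, List.sum_cons]
      push_cast
      rw [← ih]
      ring
    · rw [if_neg (by simp [hx]), if_neg (by simp [hx])]
      rw [← ih]
      ring

-- the frontier loop sums the run lengths of its members
theorem altLoop_sum (ps : List (List Int)) (m n : Nat) (sgn : Int) :
    ∀ (fuel d : Nat) (alive : List (Nat × Nat)),
    altLoop ps m n sgn fuel d alive
      = (alive.map (fun p => (runLen (fun e => altCond ps m n sgn e p) fuel d : Int))).sum := by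
  intro fuel
  induction fuel with
  | zero =>
    intro d alive
    simp [altLoop, runLen]
  | succ f ih =>
    intro d alive
    simp only [altLoop]
    by_cases ha : alive.isEmpty
    · rw [if_pos ha]
      rw [List.isEmpty_iff.mp ha]
      simp
    · rw [if_neg ha, ih]
      rw [filter_len_sum]
      apply congrArg
      apply List.map_congr_left
      intro p _
      simp only [runLen]
      by_cases hq : altCond ps m n sgn d p = true
      · rw [if_pos hq, if_pos hq]
        push_cast
        ring
      · rw [if_neg hq, if_neg hq]
        simp

-- enough fuel: the frontier count of an apex equals A's downward scan
theorem run_down_eq (g : List (List Int)) (n : Nat) {i : Nat} (j : Nat)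
    (hi : i < g.length) :
    runLen (fun e => altCond (g.map altPrefix) g.length n 1 e (i, j)) (g.length + 1) 1
      = runLen (pvCB g n j (fun t => i + t)) (g.length - i - 1) 1 := by
  have hr := runLen_le (pvCB g n j (fun t => i + t)) (g.length - i - 1) 1
  apply runLen_eq_of
  · omega
  · intro e he1 he2
    rw [altCond_down]
    simp only [Bool.and_eq_true, decide_eq_true_eq]
    exact ⟨by omega, runLen_true _ _ _ _ he1 he2⟩
  · right
    by_cases hlt : runLen (pvCB g n j (fun t => i + t)) (g.length - i - 1) 1
        < g.length - i - 1
    · have hstop := runLen_stop (pvCB g n j (fun t => i + t)) (g.length - i - 1) 1 hlt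
      rw [altCond_down]
      simp only [Bool.and_eq_false_iff]
      right
      exact hstop
    · have heq : runLen (pvCB g n j (fun t => i + t)) (g.length - i - 1) 1
          = g.length - i - 1 := by omega
      rw [altCond_down]
      simp only [Bool.and_eq_false_iff, decide_eq_false_iff_not]
      left
      omega

-- enough fuel: the frontier count of an apex equals A's upward scan
theorem run_up_eq (g : List (List Int)) (n : Nat) {i : Nat} (j : Nat)
    (hi : i < g.length) :
    runLen (fun e => altCond (g.map altPrefix) g.length n (-1) e (i, j)) (g.length + 1) 1
      = runLen (pvCB g n j (fun t => i - t)) i 1 := by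
  have hr := runLen_le (pvCB g n j (fun t => i - t)) i 1
  apply runLen_eq_of
  · omega
  · intro e he1 he2
    rw [altCond_up g n j e hi]
    simp only [Bool.and_eq_true, decide_eq_true_eq]
    exact ⟨by omega, runLen_true _ _ _ _ he1 he2⟩
  · right
    by_cases hlt : runLen (pvCB g n j (fun t => i - t)) i 1 < i
    · have hstop := runLen_stop (pvCB g n j (fun t => i - t)) i 1 hlt
      rw [altCond_up g n j _ hi]
      simp only [Bool.and_eq_false_iff]
      right
      exact hstop
    · have heq : runLen (pvCB g n j (fun t => i - t)) i 1 = i := by omega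
      rw [altCond_up g n j _ hi]
      simp only [Bool.and_eq_false_iff, decide_eq_false_iff_not]
      left
      omega

theorem sum_map_list_range (n : Nat) (f : Nat → Int) :
    ((List.range n).map f).sum = ∑ j ∈ Finset.range n, f j := by
  induction n with
  | zero => simp
  | succ k ih =>
    rw [List.range_succ, Finset.sum_range_succ, List.map_append, List.sum_append, ih]
    simp

theorem filter_map_sum_ite {α : Type} (q : α → Bool) (F : α → Int) : ∀ (L : List α),
    ((L.filter q).map F).sum = (L.map (fun x => if q x then F x else 0)).sum := by
  intro L
  induction L with
  | nil => simp
  | cons x xs ih =>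
    simp only [List.filter_cons, List.map_cons, List.sum_cons]
    by_cases hx : q x
    · rw [if_pos hx, if_pos hx]
      simp only [List.map_cons, List.sum_cons]
      rw [ih]
    · rw [if_neg (by simp [hx]), if_neg (by simp [hx]), ih]
      ring

theorem sum_map_flatMap {α β : Type} (F : β → Int) (h : α → List β) : ∀ (L : List α),
    ((L.flatMap h).map F).sum = (L.map (fun a => ((h a).map F).sum)).sum := by
  intro L
  induction L with
  | nil => simp
  | cons x xs ih =>
    simp only [List.flatMap_cons, List.map_append, List.sum_append, List.map_cons,
      List.sum_cons, ih]

-- B's initial frontier, summed apex-wise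
theorem alive_sum (g : List (List Int)) (m n : Nat) (F : Nat × Nat → Int) :
    (((List.range m).flatMap (fun i =>
        ((List.range n).filter (fun j => (g.getD i []).getD j 0 ≠ 0)).map
          (fun j => (i, j)))).map F).sum
      = ∑ i ∈ Finset.range m, ∑ j ∈ Finset.range n,
          (if (g.getD i []).getD j 0 = 0 then 0 else F (i, j)) := by
  rw [sum_map_flatMap]
  rw [show (fun a => ((((List.range n).filter
        (fun j => (g.getD a []).getD j 0 ≠ 0)).map (fun j => (a, j))).map F).sum)
      = (fun a => ∑ j ∈ Finset.range n,
          (if (g.getD a []).getD j 0 = 0 then 0 else F (a, j))) from ?_]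
  · rw [sum_map_list_range]
  · funext a
    rw [List.map_map, filter_map_sum_ite, sum_map_list_range]
    apply Finset.sum_congr rfl
    intro j _
    simp only [Function.comp]
    by_cases hc : (g.getD a []).getD j 0 = 0
    · rw [if_neg (by simp only [decide_eq_true_eq]; exact not_not_intro hc), if_pos hc]
    · rw [if_pos (by simp only [decide_eq_true_eq]; exact hc), if_neg hc]

theorem foldl_range_add (k : Nat) (f : Nat → Int) (a : Int) :
    (List.range k).foldl (fun acc x => acc + f x) a = a + ∑ x ∈ Finset.range k, f x := by
  induction k with
  | zero => simp
  | succ q ih =>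
    rw [List.range_succ, List.foldl_append, ih, Finset.sum_range_succ]
    simp only [List.foldl_cons, List.foldl_nil]
    ring

-- A as a double Finset sum of per-apex contributions
theorem countA_sum (g : List (List Int)) :
    countPyramids1 g = ∑ i ∈ Finset.range g.length, ∑ j ∈ Finset.range (g.getD 0 []).length,
      (if (g.getD i []).getD j 0 = 0 then 0
       else aScan (g.map aPrefix) (((g.getD 0 []).length : Nat) : Int) j (fun d => i + d) (g.length - i - 1) 1
          + aScan (g.map aPrefix) (((g.getD 0 []).length : Nat) : Int) j (fun d => i - d) i 1) := by
  unfold countPyramids1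
  simp only []
  have hfun : (fun (ans : Int) i => (List.range (g.getD 0 []).length).foldl
      (fun ans j => if (g.getD i []).getD j 0 = 0 then ans
        else ans + aScan (g.map aPrefix) (((g.getD 0 []).length : Nat) : Int) j (fun d => i + d) (g.length - i - 1) 1
                 + aScan (g.map aPrefix) (((g.getD 0 []).length : Nat) : Int) j (fun d => i - d) i 1) ans)
      = (fun (ans : Int) i => ans + ∑ j ∈ Finset.range (g.getD 0 []).length,
          (if (g.getD i []).getD j 0 = 0 then 0
           else aScan (g.map aPrefix) (((g.getD 0 []).length : Nat) : Int) j (fun d => i + d) (g.length - i - 1) 1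
              + aScan (g.map aPrefix) (((g.getD 0 []).length : Nat) : Int) j (fun d => i - d) i 1)) := by
    funext ans i
    have hfj : (fun (ans : Int) j => if (g.getD i []).getD j 0 = 0 then ans
        else ans + aScan (g.map aPrefix) (((g.getD 0 []).length : Nat) : Int) j (fun d => i + d) (g.length - i - 1) 1
                 + aScan (g.map aPrefix) (((g.getD 0 []).length : Nat) : Int) j (fun d => i - d) i 1)
        = (fun (ans : Int) j => ans + (if (g.getD i []).getD j 0 = 0 then 0
           else aScan (g.map aPrefix) (((g.getD 0 []).length : Nat) : Int) j (fun d => i + d) (g.length - i - 1) 1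
              + aScan (g.map aPrefix) (((g.getD 0 []).length : Nat) : Int) j (fun d => i - d) i 1)) := by
      funext ans j
      by_cases hc : (g.getD i []).getD j 0 = 0
      · rw [if_pos hc, if_pos hc]; ring
      · rw [if_neg hc, if_neg hc]; ring
    rw [hfj, foldl_range_add]
  rw [hfun, foldl_range_add]
  ring

-- the two programs agree on every input (the ports are total)
theorem main_eq (g : List (List Int)) :
    countPyramids1 g = countPyramids1_alt g := by
  rw [countA_sum]
  unfold countPyramids1_alt altSolve
  simp only []
  rw [altLoop_sum, altLoop_sum, alive_sum, alive_sum, ← Finset.sum_add_distrib]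
  apply Finset.sum_congr rfl
  intro i hi
  rw [Finset.mem_range] at hi
  rw [← Finset.sum_add_distrib]
  apply Finset.sum_congr rfl
  intro j hj
  rw [Finset.mem_range] at hj
  by_cases hc : (g.getD i []).getD j 0 = 0
  · rw [if_pos hc, if_pos hc, if_pos hc]
    ring
  · rw [if_neg hc, if_neg hc, if_neg hc]
    rw [aScan_eq, aScan_eq, run_down_eq g _ j hi, run_up_eq g _ j hi]
  -- done

-- ===== VERDICT (by name: the statement is the Claim_ definition above) =====
theorem countPyramids1_spec : Claim_equal_countPyramids1 := by
  intro g _ hpre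
  unfold Spec_countPyramids1
  exact main_eq g
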